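-- pv_equiv track=rewrite | github.com/motegilab/ai-orchestrator-loop | tools/orchestrator/planner.py | _extract_ask_focus
-- ===== SOURCE A (Python) =====
-- from typing import Any, Dict, List, Optional, Tuple
--
-- def _extract_ask_focus(report_text: str) -> Tuple[str, str]:
--     ask = ""
--     focus = ""
--     for raw in report_text.splitlines():
--         line = raw.strip()
--         if line.startswith("- ASK:"):
--             ask = line[len("- ASK:") :].strip()
--         elif line.startswith("- FOCUS:"):
--             focus = line[len("- FOCUS:") :].strip()
--     return ask, focus
-- ===== SOURCE B (Python) =====
-- def _extract_ask_focus(report_text: str):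
--     ask = ""
--     focus = ""
--     ask_found = False
--     focus_found = False
--     for raw in reversed(report_text.splitlines()):
--         line = raw.strip()
--         if not ask_found and line.startswith("- ASK:"):
--             ask = line[len("- ASK:"):].strip()
--             ask_found = True
--         elif not focus_found and line.startswith("- FOCUS:"):
--             focus = line[len("- FOCUS:"):].strip()
--             focus_found = True
--         if ask_found and focus_found:
--             break
--     return ask, focus
-- ===== Notes on version B (the rewrite author's own statement) =====
-- stated objective: alternative
-- what changed: B scans the lines in reverse with found-flags and breaks as soon as both the last ASK and last FOCUS lines are located, instead of A's full forward pass that keeps overwriting; on reports where both markers appear near the end B examines only a suffix.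
import Mathlib
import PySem

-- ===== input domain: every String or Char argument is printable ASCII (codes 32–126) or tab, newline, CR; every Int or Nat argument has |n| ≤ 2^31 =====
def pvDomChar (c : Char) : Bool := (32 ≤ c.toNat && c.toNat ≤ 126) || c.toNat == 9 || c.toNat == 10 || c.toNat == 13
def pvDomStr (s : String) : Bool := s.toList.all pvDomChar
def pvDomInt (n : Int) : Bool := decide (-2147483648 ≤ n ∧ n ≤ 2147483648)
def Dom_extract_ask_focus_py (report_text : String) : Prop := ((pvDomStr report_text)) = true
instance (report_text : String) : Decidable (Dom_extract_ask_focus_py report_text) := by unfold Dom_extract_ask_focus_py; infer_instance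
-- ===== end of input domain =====

-- B scans the lines in reverse with found-flags and early break instead of A's full forward
-- overwrite pass; return values proved identical on all inputs (objective: alternative).

-- ===== PORT A =====
def pvStepA (s : String × String) (raw : String) : String × String :=
  let line := PySem.Str.strip raw
  if PySem.Str.startswith line "- ASK:" then
    (PySem.Str.strip (PySem.Str.slice line (some 6) none), s.2)
  else if PySem.Str.startswith line "- FOCUS:" then
    (s.1, PySem.Str.strip (PySem.Str.slice line (some 8) none))
  else s

def extract_ask_focus_py (report_text : String) : String × String :=
  (PySem.Str.splitlines report_text).foldl pvStepA ("", "")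

-- ===== PORT B =====
-- the reverse loop of Source B: flags ask_found / focus_found, break once both set
def pvLoopB : List String → String → String → Bool → Bool → String × String
  | [], ask, focus, _, _ => (ask, focus)
  | raw :: rest, ask, focus, af, ff =>
    let line := PySem.Str.strip raw
    if !af && PySem.Str.startswith line "- ASK:" then
      let ask' := PySem.Str.strip (PySem.Str.slice line (some 6) none)
      if ff then (ask', focus) else pvLoopB rest ask' focus true ff
    else if !ff && PySem.Str.startswith line "- FOCUS:" then
      let focus' := PySem.Str.strip (PySem.Str.slice line (some 8) none)
      if af then (ask, focus') else pvLoopB rest ask focus' af true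
    else pvLoopB rest ask focus af ff

def extract_ask_focus_py_alt (report_text : String) : String × String :=
  pvLoopB (PySem.Str.splitlines report_text).reverse "" "" false false

-- ===== PRECONDITION & SPEC =====
def Spec_extract_ask_focus_py (report_text : String) (out : String × String) : Prop := out = extract_ask_focus_py_alt report_text
instance (report_text : String) (out : String × String) : Decidable (Spec_extract_ask_focus_py report_text out) := by unfold Spec_extract_ask_focus_py; infer_instance

-- ===== CLAIM (what is proved, stated in full; the proofs are below) =====
def Claim_equal_extract_ask_focus_py : Prop := ∀ (report_text : String), Dom_extract_ask_focus_py report_text → Spec_extract_ask_focus_py report_text (extract_ask_focus_py report_text)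

-- ===== LEMMAS AND PROOFS =====

-- payload of an ASK line, none otherwise
def pvAsk? (raw : String) : Option String :=
  let line := PySem.Str.strip raw
  if PySem.Str.startswith line "- ASK:" then
    some (PySem.Str.strip (PySem.Str.slice line (some 6) none))
  else none

def pvFocus? (raw : String) : Option String :=
  let line := PySem.Str.strip raw
  if PySem.Str.startswith line "- FOCUS:" then
    some (PySem.Str.strip (PySem.Str.slice line (some 8) none))
  else none

-- a line cannot start with both markers
theorem pv_disj (line : String) (h : PySem.Str.startswith line "- ASK:" = true) :
    PySem.Str.startswith line "- FOCUS:" = false := by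
  by_contra hf
  rw [Bool.not_eq_false] at hf
  simp only [PySem.Str.startswith_eq, PySem.Chars.startswith_iff] at h hf
  rcases List.prefix_or_prefix_of_prefix h hf with h1 | h1 <;> revert h1 <;> decide

theorem pv_getLast?_cons_getD {α : Type} (a d : α) (l : List α) :
    ((a :: l).getLast?).getD d = (l.getLast?).getD a := by
  cases l with
  | nil => rfl
  | cons b t =>
    rw [List.getLast?_cons_cons]
    cases h : (b :: t).getLast? with
    | none => simp at h
    | some x => rfl

-- A's fold computes the payloads of the LAST ask/focus lines
theorem pv_foldA (ls : List String) : ∀ (a0 f0 : String),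
    ls.foldl pvStepA (a0, f0) =
      (((ls.filterMap pvAsk?).getLast?).getD a0, ((ls.filterMap pvFocus?).getLast?).getD f0) := by
  induction ls with
  | nil => intro a0 f0; rfl
  | cons raw rest ih =>
    intro a0 f0
    by_cases hA : PySem.Str.startswith (PySem.Str.strip raw) "- ASK:" = true
    · have hF := pv_disj _ hA
      have hA2 : PySem.Chars.startswith (PySem.Chars.strip raw.toList) ['-', ' ', 'A', 'S', 'K', ':'] = true := by
        simpa using hA
      have hF2 : PySem.Chars.startswith (PySem.Chars.strip raw.toList) ['-', ' ', 'F', 'O', 'C', 'U', 'S', ':'] = false := by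
        simpa using hF
      have ha : pvAsk? raw = some (PySem.Str.strip (PySem.Str.slice (PySem.Str.strip raw) (some 6) none)) := by
        simp [pvAsk?, hA2]
      have hf : pvFocus? raw = none := by simp [pvFocus?, hF2]
      have hs : pvStepA (a0, f0) raw =
          (PySem.Str.strip (PySem.Str.slice (PySem.Str.strip raw) (some 6) none), f0) := by
        simp [pvStepA, hA2]
      rw [List.foldl_cons, hs, ih, List.filterMap_cons_some (h := ha),
        List.filterMap_cons_none (h := hf), pv_getLast?_cons_getD]
    · by_cases hF : PySem.Str.startswith (PySem.Str.strip raw) "- FOCUS:" = true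
      · have hA2 : PySem.Chars.startswith (PySem.Chars.strip raw.toList) ['-', ' ', 'A', 'S', 'K', ':'] = false := by
          simpa using hA
        have hF2 : PySem.Chars.startswith (PySem.Chars.strip raw.toList) ['-', ' ', 'F', 'O', 'C', 'U', 'S', ':'] = true := by
          simpa using hF
        have ha : pvAsk? raw = none := by simp [pvAsk?, hA2]
        have hf : pvFocus? raw = some (PySem.Str.strip (PySem.Str.slice (PySem.Str.strip raw) (some 8) none)) := by
          simp [pvFocus?, hF2]
        have hs : pvStepA (a0, f0) raw =
            (a0, PySem.Str.strip (PySem.Str.slice (PySem.Str.strip raw) (some 8) none)) := by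
          simp [pvStepA, hA2, hF2]
        rw [List.foldl_cons, hs, ih, List.filterMap_cons_none (h := ha),
          List.filterMap_cons_some (h := hf), pv_getLast?_cons_getD]
      · have hA2 : PySem.Chars.startswith (PySem.Chars.strip raw.toList) ['-', ' ', 'A', 'S', 'K', ':'] = false := by
          simpa using hA
        have hF2 : PySem.Chars.startswith (PySem.Chars.strip raw.toList) ['-', ' ', 'F', 'O', 'C', 'U', 'S', ':'] = false := by
          simpa using hF
        have ha : pvAsk? raw = none := by simp [pvAsk?, hA2]
        have hf : pvFocus? raw = none := by simp [pvFocus?, hF2]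
        have hs : pvStepA (a0, f0) raw = (a0, f0) := by simp [pvStepA, hA2, hF2]
        rw [List.foldl_cons, hs, ih, List.filterMap_cons_none (h := ha),
          List.filterMap_cons_none (h := hf)]

-- B's loop: the first not-yet-found ask/focus payloads of the remaining lines
theorem pv_loopB (ls : List String) : ∀ (a f : String) (af ff : Bool),
    pvLoopB ls a f af ff =
      ((if af then a else ((ls.filterMap pvAsk?).head?).getD a),
       (if ff then f else ((ls.filterMap pvFocus?).head?).getD f)) := by
  induction ls with
  | nil => intro a f af ff; cases af <;> cases ff <;> rfl
  | cons raw rest ih =>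
    intro a f af ff
    by_cases hA : PySem.Str.startswith (PySem.Str.strip raw) "- ASK:" = true
    · have hF := pv_disj _ hA
      have hA2 : PySem.Chars.startswith (PySem.Chars.strip raw.toList) ['-', ' ', 'A', 'S', 'K', ':'] = true := by
        simpa using hA
      have hF2 : PySem.Chars.startswith (PySem.Chars.strip raw.toList) ['-', ' ', 'F', 'O', 'C', 'U', 'S', ':'] = false := by
        simpa using hF
      have ha : pvAsk? raw = some (PySem.Str.strip (PySem.Str.slice (PySem.Str.strip raw) (some 6) none)) := by
        simp [pvAsk?, hA2]
      have hf : pvFocus? raw = none := by simp [pvFocus?, hF2]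
      rw [List.filterMap_cons_some (h := ha), List.filterMap_cons_none (h := hf)]
      cases af <;> cases ff <;> simp [pvLoopB, hA2, hF2, ih]
    · by_cases hF : PySem.Str.startswith (PySem.Str.strip raw) "- FOCUS:" = true
      · have hA2 : PySem.Chars.startswith (PySem.Chars.strip raw.toList) ['-', ' ', 'A', 'S', 'K', ':'] = false := by
          simpa using hA
        have hF2 : PySem.Chars.startswith (PySem.Chars.strip raw.toList) ['-', ' ', 'F', 'O', 'C', 'U', 'S', ':'] = true := by
          simpa using hF
        have ha : pvAsk? raw = none := by simp [pvAsk?, hA2]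
        have hf : pvFocus? raw = some (PySem.Str.strip (PySem.Str.slice (PySem.Str.strip raw) (some 8) none)) := by
          simp [pvFocus?, hF2]
        rw [List.filterMap_cons_none (h := ha), List.filterMap_cons_some (h := hf)]
        cases af <;> cases ff <;> simp [pvLoopB, hA2, hF2, ih]
      · have hA2 : PySem.Chars.startswith (PySem.Chars.strip raw.toList) ['-', ' ', 'A', 'S', 'K', ':'] = false := by
          simpa using hA
        have hF2 : PySem.Chars.startswith (PySem.Chars.strip raw.toList) ['-', ' ', 'F', 'O', 'C', 'U', 'S', ':'] = false := by
          simpa using hF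
        have ha : pvAsk? raw = none := by simp [pvAsk?, hA2]
        have hf : pvFocus? raw = none := by simp [pvFocus?, hF2]
        rw [List.filterMap_cons_none (h := ha), List.filterMap_cons_none (h := hf)]
        cases af <;> cases ff <;> simp [pvLoopB, hA2, hF2, ih]

-- ===== VERDICT (by name: the statement is the Claim_ definition above) =====
theorem extract_ask_focus_py_spec : Claim_equal_extract_ask_focus_py := by
  intro report_text _
  unfold Spec_extract_ask_focus_py extract_ask_focus_py extract_ask_focus_py_alt
  rw [pv_foldA, pv_loopB]
  simp [List.filterMap_reverse, List.head?_reverse]
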